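-- pv_equiv track=rewrite | github.com/Albiama20/Ranking | elo_utils.py | input_check
-- ===== SOURCE A (Python) =====
-- def input_check(order_list, players_dict):
--     """
--     Input is valid if:
--     1. order_list contains at least 2 distinct elements
--     2. all elements are keys from the players_dict dictionary
--     3. there are no duplicates in the list
--     """
--     if len(order_list) != len(set(order_list)):
--         return False
--     if len(order_list) < 2:
--         return False
--     if not all(player in players_dict for player in order_list):
--         return False
--     return True
-- ===== SOURCE B (Python) =====
-- def input_check(order_list, players_dict):
--     seen = set()
--     for player in order_list:
--         if player in seen or player not in players_dict:
--             return False
--         seen.add(player)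
--     return len(seen) >= 2
-- ===== Notes on version B (the rewrite author's own statement) =====
-- stated objective: simpler
-- what changed: Replaces A's three separate scans (building set(order_list), comparing lengths, then an all() membership pass) with one short-circuiting loop maintaining a seen-set that rejects a duplicate or missing key immediately and returns len(seen) >= 2 at the end (measured constant-factor speedup from the single pass/early exit).
import Mathlib
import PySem

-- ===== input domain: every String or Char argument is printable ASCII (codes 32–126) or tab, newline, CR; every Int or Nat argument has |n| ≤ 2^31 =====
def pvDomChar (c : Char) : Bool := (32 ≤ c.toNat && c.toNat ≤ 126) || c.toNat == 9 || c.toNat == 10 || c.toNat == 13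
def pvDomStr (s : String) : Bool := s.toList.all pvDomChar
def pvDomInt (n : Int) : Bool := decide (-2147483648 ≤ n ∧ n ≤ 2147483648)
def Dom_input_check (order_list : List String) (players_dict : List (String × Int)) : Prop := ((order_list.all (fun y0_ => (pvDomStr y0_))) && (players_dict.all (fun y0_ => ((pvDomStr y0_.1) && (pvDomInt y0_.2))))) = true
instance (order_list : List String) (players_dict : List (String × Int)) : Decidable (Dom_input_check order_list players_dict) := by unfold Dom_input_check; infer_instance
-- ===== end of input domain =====

-- B replaces A's three separate scans with one short-circuiting loop over order_list
-- maintaining a seen-set (objective: simpler).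


-- ===== PORT A =====
def input_check (order_list : List String) (players_dict : List (String × Int)) : Bool :=
  if order_list.length ≠ (PySem.Set.ofList order_list).length then false
  else if order_list.length < 2 then false
  else if !(order_list.all (fun player => PySem.Dict.contains (PySem.Dict.mk players_dict) player)) then false
  else true

-- ===== PORT B =====
def inputCheckLoop (players_dict : List (String × Int)) : List String → PySem.Set String → Bool
  | [], seen => decide (2 ≤ seen.length)
  | player :: rest, seen =>
    if PySem.Set.contains seen player || !(PySem.Dict.contains (PySem.Dict.mk players_dict) player) then false
    else inputCheckLoop players_dict rest (PySem.Set.add seen player)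

def input_check_alt (order_list : List String) (players_dict : List (String × Int)) : Bool :=
  inputCheckLoop players_dict order_list PySem.Set.empty

-- ===== PRECONDITION & SPEC =====
def Spec_input_check (order_list : List String) (players_dict : List (String × Int)) (out : Bool) : Prop := out = input_check_alt order_list players_dict
instance (order_list : List String) (players_dict : List (String × Int)) (out : Bool) : Decidable (Spec_input_check order_list players_dict out) := by unfold Spec_input_check; infer_instance

-- ===== CLAIM (what is proved, stated in full; the proofs are below) =====
def Claim_equal_input_check : Prop := ∀ (order_list : List String) (players_dict : List (String × Int)), Dom_input_check order_list players_dict → Spec_input_check order_list players_dict (input_check order_list players_dict)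

-- ===== LEMMAS AND PROOFS =====

-- set(xs) has the same size as xs exactly when xs has no duplicates
lemma ofList_length_eq_iff (xs : List String) :
    (PySem.Set.ofList xs).length = xs.length ↔ xs.Nodup := by
  constructor
  · intro h
    have hnd := PySem.Set.nodup_ofList (xs := xs)
    have hcard : (PySem.Set.ofList xs).toFinset = xs.toFinset := by
      ext y; simp [List.mem_toFinset, PySem.Set.mem_ofList]
    have h1 : (PySem.Set.ofList xs).toFinset.card = (PySem.Set.ofList xs).length :=
      List.toFinset_card_of_nodup hnd
    have h2 : xs.toFinset.card = xs.dedup.length := List.card_toFinset xs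
    have hlen : xs.dedup.length = xs.length := by rw [← h2, ← hcard, h1, h]
    exact List.dedup_eq_self.mp (List.Sublist.eq_of_length (List.dedup_sublist xs) hlen)
  · intro h
    rw [PySem.Set.ofList_eq_self_of_nodup xs h]

-- loop invariant for B's single pass
lemma inputCheckLoop_true_iff (pd : List (String × Int)) (xs : List String)
    (seen : PySem.Set String) :
    inputCheckLoop pd xs seen = true ↔
      xs.Nodup ∧ (∀ p ∈ xs, ¬ p ∈ seen) ∧
      (∀ p ∈ xs, PySem.Dict.contains (PySem.Dict.mk pd) p = true) ∧ 2 ≤ seen.length + xs.length := by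
  induction xs generalizing seen with
  | nil => simp [inputCheckLoop]
  | cons p rest ih =>
    simp only [inputCheckLoop]
    by_cases hs : p ∈ seen
    · have hcs : PySem.Set.contains seen p = true := (PySem.Set.contains_iff seen p).mpr hs
      simp [hs]
    · have hcs : PySem.Set.contains seen p = false := by
        rw [Bool.eq_false_iff]
        intro h; exact hs ((PySem.Set.contains_iff seen p).mp h)
      rw [hcs]
      by_cases hd : PySem.Dict.contains (PySem.Dict.mk pd) p = true
      · rw [hd]
        simp only [Bool.not_true, Bool.or_false, if_neg (by simp : ¬ (false = true))]
        rw [ih, PySem.Set.add_of_not_mem hs]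
        simp only [List.nodup_cons, List.mem_cons, List.mem_append, List.not_mem_nil,
          or_false, List.length_append, List.length_cons, List.length_nil]
        constructor
        · rintro ⟨h1, h2, h3, h4⟩
          push Not at h2
          refine ⟨⟨fun hm => (h2 p hm).2 rfl, h1⟩, ?_, ?_, by omega⟩
          · rintro q (rfl | hq)
            · exact hs
            · exact (h2 q hq).1
          · rintro q (rfl | hq)
            · exact hd
            · exact h3 q hq
        · rintro ⟨⟨hpn, h1⟩, h2, h3, h4⟩
          refine ⟨h1, ?_, fun q hq => h3 q (Or.inr hq), by omega⟩
          intro q hq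
          push Not
          exact ⟨h2 q (Or.inr hq), fun hqp => hpn (hqp ▸ hq)⟩
      · rw [Bool.eq_false_iff.mpr hd]
        simp only [Bool.not_false, Bool.or_true, if_true]
        constructor
        · intro h; cases h
        · rintro ⟨_, _, h3, _⟩
          exact absurd (h3 p (List.mem_cons_self)) hd

lemma input_check_true_iff (ol : List String) (pd : List (String × Int)) :
    input_check ol pd = true ↔
      ol.Nodup ∧ (∀ p ∈ ol, PySem.Dict.contains (PySem.Dict.mk pd) p = true) ∧ 2 ≤ ol.length := by
  unfold input_check
  split_ifs with h1 h2 h3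
  · simp only [false_iff]
    rintro ⟨hnd, -, -⟩
    exact h1 ((ofList_length_eq_iff ol).mpr hnd).symm
  · simp only [false_iff]
    rintro ⟨-, -, hlen⟩
    omega
  · simp only [false_iff]
    rintro ⟨-, hall, -⟩
    rw [Bool.not_eq_true'] at h3
    exact absurd (List.all_eq_true.mpr hall) (by simp [h3])
  · simp only [true_iff]
    rw [Bool.not_eq_true, Bool.not_eq_false', List.all_eq_true] at h3
    refine ⟨(ofList_length_eq_iff ol).mp (Eq.symm ?_), fun p hp => h3 p hp, by omega⟩
    exact not_ne_iff.mp h1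

-- ===== VERDICT (by name: the statement is the Claim_ definition above) =====
theorem input_check_spec : Claim_equal_input_check := by
  intro ol pd _
  unfold Spec_input_check input_check_alt
  rw [Bool.eq_iff_iff, input_check_true_iff, inputCheckLoop_true_iff]
  simp [PySem.Set.empty]
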